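-- pv_equiv track=rewrite | github.com/hyungmogu/algorithm-and-data-structure-exercises | codility_practice/leader/equi_leader_01.py | get_leaders_lhs
-- ===== SOURCE A (Python) =====
-- def get_leaders_lhs(A,N):
--     numbers_frequency = {}
--     leaders_list = [None] * N
--     index = 0
--     leader = None
--
--     # 1. for element, index in A
--     while index < N:
--         # 2. add count to key 'element'
--         number = A[index]
--         n = A[:index+1]
--
--         if number in numbers_frequency:
--             numbers_frequency[number] += 1
--         else:
--             numbers_frequency[number] = 1
--
--         # 3. set leader
--         if leader is None:
--             leader = number
--
--         #   3.1 if current dominator has count more than len(A[:index+1]) // 2, set leader[index] = dominator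
--         if numbers_frequency[leader] > (len(n) // 2):
--             leaders_list[index] = leader
--
--         #   3,2 if A[index] has count more than len(A[:index+1]) // 2, set leader[index] = dominator and set dominator = element
--         if numbers_frequency[number] > (len(n) // 2):
--             leaders_list[index] = number
--             leader = number
--
--         index += 1
--
--     return leaders_list
-- ===== SOURCE B (Python) =====
-- def get_leaders_lhs(A, N):
--     freq = {}
--     candidate = None
--     votes = 0
--     leaders_list = []
--     for index in range(N):
--         x = A[index]
--         freq[x] = freq.get(x, 0) + 1
--         if votes == 0:
--             candidate = x
--             votes = 1
--         elif candidate == x: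
--             votes += 1
--         else:
--             votes -= 1
--         leaders_list.append(candidate if freq[candidate] > (index + 1) // 2 else None)
--     return leaders_list
-- ===== Notes on version B (the rewrite author's own statement) =====
-- stated objective: faster
-- what changed: Replaces A's leader-tracking with two conditional overwrites into a preallocated list (and an O(N) prefix slice A[:index+1] taken each iteration) by single-check Boyer-Moore majority voting (candidate/votes) verified against an exact frequency map, appending one verified cell per prefix with no slicing.
import Mathlib
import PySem

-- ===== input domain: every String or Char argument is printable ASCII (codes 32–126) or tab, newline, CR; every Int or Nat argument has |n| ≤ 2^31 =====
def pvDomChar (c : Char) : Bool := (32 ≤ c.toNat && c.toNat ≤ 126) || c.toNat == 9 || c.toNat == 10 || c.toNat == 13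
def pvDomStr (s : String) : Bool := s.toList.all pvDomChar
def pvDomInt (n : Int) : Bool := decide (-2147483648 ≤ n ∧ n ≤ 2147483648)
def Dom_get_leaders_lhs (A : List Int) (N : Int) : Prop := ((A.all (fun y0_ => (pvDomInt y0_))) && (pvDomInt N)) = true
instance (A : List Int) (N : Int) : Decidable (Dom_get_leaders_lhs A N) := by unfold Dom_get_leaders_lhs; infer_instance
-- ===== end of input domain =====

-- B replaces A's leader tracking (plus an O(N) prefix slice per step) by Boyer-Moore voting with an
-- exact-count verification; A = B is proved on all inputs with N ≤ len(A) (elsewhere both raise IndexError).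

-- ===== PORT A =====
-- Literal port of A's while-loop; fuel = N.toNat counts the iterations of 'while index < N'.
-- pyGet? returns none exactly where Python's A[index] raises IndexError (excluded by Pre_);
-- numbers_frequency[leader] is getD 0 (the leader key always exists when that line is reached).
def pvALoop (A : List Int) (N : Int) :
    Nat → PySem.Dict Int Int → List (Option Int) → Option Int → Int → List (Option Int)
  | 0, _, leaders, _, _ => leaders
  | fuel+1, freq, leaders, leader, index =>
    if index < N then
      match PySem.List.pyGet? A index with
      | none => leaders
      | some number =>
        let n := PySem.List.slice A none (some (index + 1))
        let freq1 := if freq.contains number then freq.modify number 0 (· + 1) else freq.insert number 1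
        let l : Int := leader.getD number
        let half := PySem.Int.floordiv ((n.length : Int)) 2
        let leaders1 := if freq1.getD l 0 > half then leaders.set index.toNat (some l) else leaders
        let st := if freq1.getD number 0 > half then (leaders1.set index.toNat (some number), some number)
                  else (leaders1, some l)
        pvALoop A N fuel freq1 st.1 st.2 (index + 1)
    else leaders

def get_leaders_lhs (A : List Int) (N : Int) : List (Option Int) :=
  pvALoop A N N.toNat PySem.Dict.empty (List.replicate N.toNat none) none 0

-- ===== PORT B =====
-- Port of B: one Boyer-Moore step per index (state = (freq, candidate, votes, leaders_list)).
def pvBStep (A : List Int) (st : PySem.Dict Int Int × Option Int × Int × List (Option Int)) (index : Int) :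
    PySem.Dict Int Int × Option Int × Int × List (Option Int) :=
  let (freq, cand, votes, out) := st
  match PySem.List.pyGet? A index with
  | none => (freq, cand, votes, out)   -- Python raises IndexError here (excluded by Pre_)
  | some x =>
    let freq1 := freq.insert x (freq.getD x 0 + 1)
    let cv : Option Int × Int :=
      if votes = 0 then (some x, 1)
      else if cand = some x then (cand, votes + 1)
      else (cand, votes - 1)
    let cell : Option Int :=
      if freq1.getD (cv.1.getD 0) 0 > PySem.Int.floordiv (index + 1) 2 then cv.1 else none
    (freq1, cv.1, cv.2, out ++ [cell])

def get_leaders_lhs_alt (A : List Int) (N : Int) : List (Option Int) :=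
  ((PySem.List.pyRange 0 N 1).foldl (pvBStep A) (PySem.Dict.empty, none, 0, [])).2.2.2

-- ===== PRECONDITION & SPEC =====
-- Pre_ excludes exactly N > len(A), where A (and B) raise IndexError at A[index].
def Pre_get_leaders_lhs (A : List Int) (N : Int) : Prop := N ≤ (A.length : Int)
instance (A : List Int) (N : Int) : Decidable (Pre_get_leaders_lhs A N) := by
  unfold Pre_get_leaders_lhs; infer_instance
def pvWitness_get_leaders_lhs : List Int × Int := ([1, 2, 1], 3)

def Spec_get_leaders_lhs (A : List Int) (N : Int) (out : List (Option Int)) : Prop := out = get_leaders_lhs_alt A N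
instance (A : List Int) (N : Int) (out : List (Option Int)) : Decidable (Spec_get_leaders_lhs A N out) := by unfold Spec_get_leaders_lhs; infer_instance

-- ===== CLAIM (what is proved, stated in full; the proofs are below) =====
def Claim_equal_get_leaders_lhs : Prop := ∀ (A : List Int) (N : Int), Dom_get_leaders_lhs A N → Pre_get_leaders_lhs A N → Spec_get_leaders_lhs A N (get_leaders_lhs A N)

-- ===== LEMMAS AND PROOFS =====

-- m is a (strict) majority element of p
def pvMaj (p : List Int) (m : Int) : Prop := p.length < 2 * p.count m

-- the majority element of p, if any (find? returns it since it occurs in p)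
def pvMajOpt (p : List Int) : Option Int := p.find? (fun y => decide (p.length < 2 * p.count y))

-- the common reference value: the majority of each prefix A[:j+1], for j < N
def pvRef (A : List Int) (N : Int) : List (Option Int) :=
  (List.range N.toNat).map (fun j => pvMajOpt (A.take (j+1)))

lemma pv_count_pair_le (p : List Int) (a b : Int) (h : a ≠ b) :
    p.count a + p.count b ≤ p.length := by
  induction p with
  | nil => simp
  | cons z t ih =>
    simp only [List.count_cons, List.length_cons, beq_iff_eq]
    split_ifs with h1 h2
    all_goals omega

lemma pvMaj_unique {p : List Int} {a b : Int} (ha : pvMaj p a) (hb : pvMaj p b) : a = b := by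
  by_contra h
  have := pv_count_pair_le p a b h
  unfold pvMaj at ha hb
  omega

lemma pvMaj_of_majOpt {p : List Int} {m : Int} (h : pvMajOpt p = some m) : pvMaj p m := by
  have := List.find?_some h
  simpa [pvMaj] using this

lemma pvMajOpt_eq_some {p : List Int} {m : Int} (h : pvMaj p m) : pvMajOpt p = some m := by
  have hmem : m ∈ p := by
    have hle := List.count_le_length (l := p) (a := m)
    have : 0 < p.count m := by unfold pvMaj at h; omega
    exact List.count_pos_iff.mp this
  have hs : (pvMajOpt p).isSome := by
    apply List.find?_isSome.mpr
    exact ⟨m, hmem, by simpa [pvMaj] using h⟩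
  obtain ⟨y, hy⟩ := Option.isSome_iff_exists.mp hs
  have hpy : pvMaj p y := pvMaj_of_majOpt hy
  rw [hy, pvMaj_unique hpy h]

lemma pvMaj_pop {p : List Int} {x m : Int} (h : pvMaj (p ++ [x]) m) (hx : x ≠ m) : pvMaj p m := by
  unfold pvMaj at *
  have hc : ([x] : List Int).count m = 0 := by
    simp [hx]
  rw [List.count_append, List.length_append, hc] at h
  simp at h
  omega

lemma pv_gt_half {c len : Nat} :
    ((c : Int) > PySem.Int.floordiv ((len : Nat) : Int) 2) ↔ len < 2 * c := by
  rw [PySem.Int.floordiv_eq_ediv_of_pos (by norm_num)]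
  omega

lemma pv_set_at {α : Type} (done : List α) (y v : α) (t : List α) :
    (done ++ y :: t).set done.length v = done ++ v :: t := by
  induction done with
  | nil => rfl
  | cons a d ih => simp [ih]

lemma pv_take_succ (A : List Int) (i : Nat) (h : i < A.length) :
    A.take (i+1) = A.take i ++ [A[i]] := by
  rw [List.take_add_one, List.getElem?_eq_getElem h]
  rfl

lemma pv_count_take_succ (A : List Int) (i : Nat) (h : i < A.length) (y : Int) :
    (A.take (i+1)).count y = (A.take i).count y + (if A[i] = y then 1 else 0) := by
  rw [pv_take_succ A i h, List.count_append]
  by_cases hxy : A[i] = y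
  · simp [hxy]
  · simp [hxy]

lemma pv_len_take (A : List Int) (i : Nat) (h : i ≤ A.length) : (A.take i).length = i := by
  rw [List.length_take]; omega


lemma pv_set_at' {α : Type} (done : List α) (y v : α) (t : List α) (i : Nat)
    (hd : done.length = i) : (done ++ y :: t).set i v = done ++ v :: t := by
  subst hd; exact pv_set_at done y v t

lemma pv_verify (p : List Int) (c : Int) (votes : Int) (hv : 0 ≤ votes)
    (hbm : ∀ y, y ≠ c → 2 * ((p.count y : Int)) ≤ ((p.length : Nat) : Int) - votes) :
    (if p.length < 2 * p.count c then (some c : Option Int) else none) = pvMajOpt p := by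
  split_ifs with h
  · exact (pvMajOpt_eq_some h).symm
  · cases hmo : pvMajOpt p with
    | none => rfl
    | some m =>
      exfalso
      have hm : pvMaj p m := pvMaj_of_majOpt hmo
      by_cases hmc : m = c
      · subst hmc; exact h hm
      · have h2 := hbm m hmc
        unfold pvMaj at hm
        push_cast at h2
        omega

lemma pv_assemble (out : List (Option Int)) (A : List Int) (i k : Nat) (cell : Option Int)
    (h : cell = pvMajOpt (A.take (i+1))) :
    (out ++ [cell]) ++ (List.range k).map (fun j => pvMajOpt (A.take (i + 1 + j + 1)))
      = out ++ (List.range (k+1)).map (fun j => pvMajOpt (A.take (i + j + 1))) := by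
  have h2 : (List.range (k+1)).map (fun j => pvMajOpt (A.take (i + j + 1)))
      = pvMajOpt (A.take (i+1)) :: (List.range k).map (fun j => pvMajOpt (A.take (i + 1 + j + 1))) := by
    rw [List.range_succ_eq_map, List.map_cons, List.map_map]
    congr 1
    apply List.map_congr_left
    intro j hj
    show pvMajOpt (A.take (i + (j + 1) + 1)) = pvMajOpt (A.take (i + 1 + j + 1))
    rw [show i + (j + 1) + 1 = i + 1 + j + 1 from by omega]
  rw [h2, h, List.append_assoc, List.singleton_append]

-- A's loop computes the prefix-majority list
lemma pvALoop_eq (A : List Int) (N : Int) (hN : N ≤ (A.length : Int)) :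
    ∀ (k i : Nat) (freq : PySem.Dict Int Int) (leader : Option Int) (done : List (Option Int)),
      (i : Int) + k = N →
      done.length = i →
      (∀ y, freq.getD y 0 = ((A.take i).count y : Int)) →
      (∀ y, freq.contains y = true ↔ y ∈ A.take i) →
      (leader = none → i = 0) →
      (∀ l m, leader = some l → pvMaj (A.take i) m → l = m) →
      pvALoop A N k freq (done ++ List.replicate k none) leader (i : Int)
        = done ++ (List.range k).map (fun j => pvMajOpt (A.take (i + j + 1))) := by
  intro k
  induction k with
  | zero =>
    intro i freq leader done hik hd hf hc hl0 hl
    simp [pvALoop]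
  | succ k ih =>
    intro i freq leader done hik hd hf hc hl0 hl
    have hiN : (i : Int) < N := by omega
    have hilen : i < A.length := by omega
    have hget : PySem.List.pyGet? A (i : Int) = some A[i] := by
      rw [PySem.List.pyGet?_natCast]; simp [hilen]
    have hcast : ((i : Int) + 1) = ((i + 1 : Nat) : Int) := by push_cast; ring
    have hslice : PySem.List.slice A none (some ((i : Int) + 1)) = A.take (i + 1) := by
      rw [hcast, PySem.List.slice_to (hb := by omega)]
      simp
    have hlen' : (A.take (i + 1)).length = i + 1 := pv_len_take A (i + 1) (by omega)
    simp only [pvALoop, if_pos hiN, hget, hslice, hlen', Int.toNat_natCast]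
    set x : Int := A[i] with hxdef
    set F : PySem.Dict Int Int :=
      if freq.contains x then freq.modify x 0 (· + 1) else freq.insert x 1 with hFdef
    set L : Int := leader.getD x with hLdef
    have hf1 : ∀ y, F.getD y 0 = ((A.take (i + 1)).count y : Int) := by
      intro y
      rw [pv_count_take_succ A i hilen y, hFdef]
      by_cases hcx : freq.contains x
      · rw [if_pos hcx, PySem.Dict.getD_modify]
        by_cases hyx : y = x
        · subst hyx; rw [if_pos rfl, if_pos rfl, hf]; push_cast; ring
        · rw [if_neg hyx, if_neg (fun h => hyx h.symm), hf]; push_cast; ring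
      · have hx0 : (A.take i).count x = 0 := by
          rw [List.count_eq_zero]
          intro hmem; exact hcx ((hc _).mpr hmem)
        rw [if_neg hcx, PySem.Dict.getD_insert]
        by_cases hyx : y = x
        · subst hyx; rw [if_pos rfl, if_pos rfl, hx0]; norm_num
        · rw [if_neg hyx, if_neg (fun h => hyx h.symm), hf]; push_cast; ring
    have hmem : ∀ y : Int, y ∈ A.take (i + 1) ↔ y ∈ A.take i ∨ y = x := by
      intro y
      rw [pv_take_succ A i hilen, List.mem_append, List.mem_singleton]
    have hc1 : ∀ y, F.contains y = true ↔ y ∈ A.take (i + 1) := by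
      intro y
      rw [hFdef, hmem y]
      by_cases hcx : freq.contains x
      · rw [if_pos hcx]
        simp only [PySem.Dict.contains_modify]
        simp [hc, beq_iff_eq, or_comm]
      · rw [if_neg hcx]
        simp only [PySem.Dict.contains_insert]
        simp [hc, beq_iff_eq, or_comm]
    have hcond : ∀ y, (F.getD y 0 > PySem.Int.floordiv ((i + 1 : Nat) : Int) 2)
        ↔ ((A.take (i + 1)).length < 2 * (A.take (i + 1)).count y) := by
      intro y
      rw [hf1 y, hlen']
      exact pv_gt_half
    have hlead' : ∀ m, pvMaj (A.take (i + 1)) m → m = x ∨ m = L := by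
      intro m hm
      by_cases hmx : m = x
      · exact Or.inl hmx
      · right
        have hpm : pvMaj (A.take i) m := by
          rw [pv_take_succ A i hilen] at hm
          exact pvMaj_pop hm (fun h => hmx h.symm)
        cases hld : leader with
        | none =>
          exfalso
          have h0 := hl0 hld
          rw [h0] at hpm
          unfold pvMaj at hpm
          simp at hpm
        | some l0 =>
          have hLl0 : L = l0 := by rw [hLdef, hld]; rfl
          rw [hLl0]
          exact (hl l0 m hld hpm).symm
    have main : ∀ (cell : Option Int) (ld : Int), cell = pvMajOpt (A.take (i + 1)) →
        (∀ m, pvMaj (A.take (i + 1)) m → ld = m) →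
        pvALoop A N k F (done ++ cell :: List.replicate k none) (some ld) ((i : Int) + 1)
          = done ++ (List.range (k + 1)).map (fun j => pvMajOpt (A.take (i + j + 1))) := by
      intro cell ld hcell hld
      rw [hcast]
      have hrec := ih (i + 1) F (some ld) (done ++ [cell])
        (by push_cast at hik ⊢; omega)
        (by simp [hd])
        hf1 hc1 (by intro h; cases h)
        (by intro l' m hl' hm; cases hl'; exact hld m hm)
      rw [List.append_assoc, List.singleton_append] at hrec
      rw [hrec]
      exact pv_assemble done A i k cell hcell
    rw [List.replicate_succ]
    rw [if_congr (hcond L) rfl rfl, if_congr (hcond x) rfl rfl]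
    by_cases hx' : (A.take (i + 1)).length < 2 * (A.take (i + 1)).count x
    · have hx2 : pvMaj (A.take (i + 1)) x := hx'
      simp only [if_pos hx']
      by_cases hl' : (A.take (i + 1)).length < 2 * (A.take (i + 1)).count L
      · simp only [if_pos hl']
        rw [pv_set_at' done none (some L) _ i hd, pv_set_at' done (some L) (some x) _ i hd]
        exact main (some x) x (pvMajOpt_eq_some hx2).symm (fun m hm => pvMaj_unique hx2 hm)
      · simp only [if_neg hl']
        rw [pv_set_at' done none (some x) _ i hd]
        exact main (some x) x (pvMajOpt_eq_some hx2).symm (fun m hm => pvMaj_unique hx2 hm)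
    · simp only [if_neg hx']
      by_cases hl' : (A.take (i + 1)).length < 2 * (A.take (i + 1)).count L
      · have hl2 : pvMaj (A.take (i + 1)) L := hl'
        simp only [if_pos hl']
        rw [pv_set_at' done none (some L) _ i hd]
        exact main (some L) L (pvMajOpt_eq_some hl2).symm (fun m hm => pvMaj_unique hl2 hm)
      · simp only [if_neg hl']
        have hnomaj : ∀ m, ¬ pvMaj (A.take (i + 1)) m := by
          intro m hm
          rcases hlead' m hm with rfl | rfl
          · exact hx' hm
          · exact hl' hm
        have hcell : (none : Option Int) = pvMajOpt (A.take (i + 1)) := by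
          cases hmo : pvMajOpt (A.take (i + 1)) with
          | none => rfl
          | some m => exact absurd (pvMaj_of_majOpt hmo) (hnomaj m)
        exact main none L hcell (fun m hm => absurd hm (hnomaj m))

-- B's fold computes the prefix-majority list
lemma pvBLoop_eq (A : List Int) (N : Int) (hN : N ≤ (A.length : Int)) :
    ∀ (k i : Nat) (freq : PySem.Dict Int Int) (cand : Option Int) (votes : Int) (out : List (Option Int)),
      (i : Int) + k = N →
      (∀ y, freq.getD y 0 = ((A.take i).count y : Int)) →
      0 ≤ votes →
      (cand = none → i = 0 ∧ votes = 0) →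
      (∀ c, cand = some c →
        (∀ y, y ≠ c → 2 * ((A.take i).count y : Int) ≤ ((A.take i).length : Int) - votes) ∧
        2 * ((A.take i).count c : Int) ≤ ((A.take i).length : Int) + votes) →
      ((PySem.List.pyRange (i : Int) N 1).foldl (pvBStep A) (freq, cand, votes, out)).2.2.2
        = out ++ (List.range k).map (fun j => pvMajOpt (A.take (i + j + 1))) := by
  intro k
  induction k with
  | zero =>
    intro i freq cand votes out hik hf hv hc0 hbm
    have hnil : PySem.List.pyRange (i : Int) N 1 = [] := by
      have : N ≤ (i : Int) := by omega
      simp [PySem.List.pyRange]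
      omega
    simp [hnil]
  | succ k ih =>
    intro i freq cand votes out hik hf hv hc0 hbm
    have hiN : (i : Int) < N := by omega
    have hilen : i < A.length := by omega
    have hget : PySem.List.pyGet? A (i : Int) = some A[i] := by
      rw [PySem.List.pyGet?_natCast]; simp [hilen]
    have hcast : ((i : Int) + 1) = ((i + 1 : Nat) : Int) := by push_cast; ring
    rw [PySem.List.pyRange_one_cons hiN, List.foldl_cons]
    simp only [pvBStep, hget]
    set x : Int := A[i] with hxdef
    set F : PySem.Dict Int Int := freq.insert x (freq.getD x 0 + 1) with hFdef
    have hf1 : ∀ y, F.getD y 0 = ((A.take (i + 1)).count y : Int) := by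
      intro y
      rw [pv_count_take_succ A i hilen y, hFdef, PySem.Dict.getD_insert]
      by_cases hyx : y = x
      · subst hyx; rw [if_pos rfl, if_pos rfl, hf]; push_cast; ring
      · rw [if_neg hyx, if_neg (fun h => hyx h.symm), hf]; push_cast; ring
    have hlen' : (A.take (i + 1)).length = i + 1 := pv_len_take A (i + 1) (by omega)
    have hleni : (A.take i).length = i := pv_len_take A i (by omega)
    have hcnt : ∀ y, (A.take (i + 1)).count y
        = (A.take i).count y + (if x = y then 1 else 0) := pv_count_take_succ A i hilen
    have hcond : ∀ c', (F.getD c' 0 > PySem.Int.floordiv ((i + 1 : Nat) : Int) 2)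
        ↔ ((A.take (i + 1)).length < 2 * (A.take (i + 1)).count c') := by
      intro c'
      rw [hf1 c', hlen']
      exact pv_gt_half
    have main : ∀ (c' v' : Int),
        0 ≤ v' →
        ((∀ y, y ≠ c' → 2 * (((A.take (i + 1)).count y : Nat) : Int) ≤ (((A.take (i + 1)).length : Nat) : Int) - v') ∧
          2 * (((A.take (i + 1)).count c' : Nat) : Int) ≤ (((A.take (i + 1)).length : Nat) : Int) + v') →
        ((PySem.List.pyRange ((i : Int) + 1) N 1).foldl (pvBStep A)
            (F, some c', v',
              out ++ [if F.getD c' 0 > PySem.Int.floordiv ((i : Int) + 1) 2 then some c' else none])).2.2.2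
          = out ++ (List.range (k + 1)).map (fun j => pvMajOpt (A.take (i + j + 1))) := by
      intro c' v' hv' hbm'
      rw [hcast]
      have hcell : (if F.getD c' 0 > PySem.Int.floordiv ((i + 1 : Nat) : Int) 2 then (some c' : Option Int) else none)
          = pvMajOpt (A.take (i + 1)) := by
        rw [if_congr (hcond c') rfl rfl]
        exact pv_verify (A.take (i + 1)) c' v' hv' hbm'.1
      have hrec := ih (i + 1) F (some c') v'
        (out ++ [if F.getD c' 0 > PySem.Int.floordiv ((i + 1 : Nat) : Int) 2 then some c' else none])
        (by push_cast at hik ⊢; omega) hf1 hv'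
        (by intro h; cases h)
        (by intro c hc; cases hc; exact hbm')
      rw [hrec]
      exact pv_assemble out A i k _ hcell
    by_cases h0 : votes = 0
    · simp only [if_pos h0]
      have hall : ∀ y, 2 * (((A.take i).count y : Nat) : Int) ≤ (((A.take i).length : Nat) : Int) := by
        intro y
        cases hcd : cand with
        | none =>
          have h1 := (hc0 hcd).1
          subst h1
          simp
        | some c =>
          rcases hbm c hcd with ⟨h1, h2⟩
          rw [h0] at h1 h2
          by_cases hyc : y = c
          · subst hyc; omega
          · have := h1 y hyc; omega
      apply main x 1 (by norm_num)
      constructor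
      · intro y hy
        have := hall y
        rw [hcnt y, hlen', hleni] at *
        rw [if_neg (fun h => hy h.symm)]
        push_cast at this ⊢
        omega
      · have := hall x
        rw [hcnt x, hlen', hleni] at *
        rw [if_pos rfl]
        push_cast at this ⊢
        omega
    · obtain ⟨c, hcand⟩ : ∃ c, cand = some c := by
        cases hcd : cand with
        | none => exact absurd (hc0 hcd).2 h0
        | some c => exact ⟨c, rfl⟩
      subst hcand
      rcases hbm c rfl with ⟨hb1, hb2⟩
      rw [hleni] at hb1 hb2
      by_cases hcx : (some c : Option Int) = some x
      · have hcA : c = x := by simpa using hcx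
        subst hcA
        simp only [if_neg h0]
        apply main x (votes + 1) (by omega)
        constructor
        · intro y hy
          have := hb1 y hy
          rw [hcnt y, hlen', if_neg (fun h => hy h.symm)]
          push_cast at this ⊢
          omega
        · rw [hcnt x, hlen', if_pos rfl]
          push_cast at hb2 ⊢
          omega
      · simp only [if_neg h0, if_neg hcx]
        have hcxne : x ≠ c := by
          intro h; exact hcx (by rw [h])
        apply main c (votes - 1) (by omega)
        constructor
        · intro y hy
          rw [hcnt y, hlen']
          by_cases hyx : y = x
          · subst hyx
            have := hb1 x (fun h => hcxne h)
            rw [if_pos rfl]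
            push_cast at this ⊢
            omega
          · have := hb1 y hy
            rw [if_neg (fun h => hyx h.symm)]
            push_cast at this ⊢
            omega
        · rw [hcnt c, hlen', if_neg hcxne]
          push_cast at hb2 ⊢
          omega

lemma pvA_eq_ref (A : List Int) (N : Int) (hN : N ≤ (A.length : Int)) :
    get_leaders_lhs A N = pvRef A N := by
  unfold get_leaders_lhs pvRef
  by_cases hneg : N < 0
  · have : N.toNat = 0 := by omega
    simp [this, pvALoop]
  · have h0 : ((0 : Nat) : Int) + N.toNat = N := by omega
    have := pvALoop_eq A N hN N.toNat 0 PySem.Dict.empty none []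
      h0 rfl (by simp) (by simp) (fun _ => rfl) (by simp)
    simpa using this

lemma pvB_eq_ref (A : List Int) (N : Int) (hN : N ≤ (A.length : Int)) :
    get_leaders_lhs_alt A N = pvRef A N := by
  unfold get_leaders_lhs_alt pvRef
  by_cases hneg : N < 0
  · have h0 : PySem.List.pyRange 0 N 1 = [] := by
      simp [PySem.List.pyRange]; omega
    have : N.toNat = 0 := by omega
    simp [h0, this]
  · have h0 : ((0 : Nat) : Int) + N.toNat = N := by omega
    have := pvBLoop_eq A N hN N.toNat 0 PySem.Dict.empty none 0 []
      h0 (by simp) le_rfl (fun _ => ⟨rfl, rfl⟩) (by simp)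
    simpa using this

-- ===== VERDICT (by name: the statement is the Claim_ definition above) =====
theorem get_leaders_lhs_spec : Claim_equal_get_leaders_lhs := by
  intro A N _hdom hpre
  unfold Spec_get_leaders_lhs
  rw [pvA_eq_ref A N hpre, pvB_eq_ref A N hpre]
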